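-- pv_equiv track=rewrite | github.com/senseuwaterloo/DynamicValueFormat | src/dynamic_info_fix/dynamic_info_combine.py | update_dynamic_token_extract_info
-- ===== SOURCE A (Python) =====
-- def update_dynamic_token_extract_info(content_tokens, new_template_tokens):
--     anchors = [token for token in new_template_tokens if token != "<*>"]
--     update_template_tokens = []
--     update_dynamic_index_list = []
--
--     content_token_index = 0
--     for anchor in anchors:
--         while content_token_index < len(content_tokens) and content_tokens[content_token_index] != anchor:
--             update_template_tokens.append('<*>')
--             update_dynamic_index_list.append(content_token_index)
--             content_token_index += 1
--         if content_token_index < len(content_tokens):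
--             update_template_tokens.append(anchor)
--             content_token_index += 1
--
--     while content_token_index < len(content_tokens):
--         update_template_tokens.append('<*>')
--         update_dynamic_index_list.append(content_token_index)
--         content_token_index += 1
--
--     update_new_template = ' '.join(update_template_tokens)
--     return update_new_template, update_dynamic_index_list
-- ===== SOURCE B (Python) =====
-- def update_dynamic_token_extract_info(content_tokens, new_template_tokens):
--     anchors = [token for token in new_template_tokens if token != "<*>"]
--     template_tokens = []
--     dynamic_indices = []
--     anchor_index = 0
--     for i, c in enumerate(content_tokens):
--         if anchor_index < len(anchors) and c == anchors[anchor_index]: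
--             template_tokens.append(anchors[anchor_index])
--             anchor_index += 1
--         else:
--             template_tokens.append('<*>')
--             dynamic_indices.append(i)
--     return ' '.join(template_tokens), dynamic_indices
-- ===== Notes on version B (the rewrite author's own statement) =====
-- stated objective: simpler
-- what changed: B replaces A's loop over anchors with a nested skip-while and a trailing cleanup-while by one flat pass over content_tokens that keeps a single anchor_index cursor and decides each token (anchor match vs dynamic) in one branch.
import Mathlib
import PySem

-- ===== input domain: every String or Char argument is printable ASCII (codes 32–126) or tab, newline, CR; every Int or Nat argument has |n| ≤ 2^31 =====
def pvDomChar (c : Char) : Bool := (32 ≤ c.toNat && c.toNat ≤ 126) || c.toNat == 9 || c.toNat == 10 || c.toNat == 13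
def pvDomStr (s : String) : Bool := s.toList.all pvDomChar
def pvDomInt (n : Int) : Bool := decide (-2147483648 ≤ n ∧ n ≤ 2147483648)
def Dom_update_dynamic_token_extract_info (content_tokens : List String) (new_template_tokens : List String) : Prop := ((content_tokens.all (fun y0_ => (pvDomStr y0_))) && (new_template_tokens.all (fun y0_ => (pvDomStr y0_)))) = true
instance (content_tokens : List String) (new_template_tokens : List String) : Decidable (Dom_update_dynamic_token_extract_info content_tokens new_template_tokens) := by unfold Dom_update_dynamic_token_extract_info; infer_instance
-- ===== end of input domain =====

-- B replaces A's anchor-driven loop (nested skip-while + trailing while) by one flat pass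
-- over content_tokens with an anchor_index cursor; same values, simpler control flow.

-- ===== PORT A =====
-- inner `while content_token_index < len(content_tokens) and content_tokens[...] != anchor`
def pvWhileSkip (content : List String) (anchor : String) (idx : Nat) (tt : List String) (dl : List Int) : List String × List Int × Nat :=
  if idx < content.length then
    if content[idx]! ≠ anchor then
      pvWhileSkip content anchor (idx + 1) (tt ++ ["<*>"]) (dl ++ [(idx : Int)])
    else (tt, dl, idx)
  else (tt, dl, idx)
termination_by content.length - idx

-- body of `for anchor in anchors`
def pvAnchorStep (content : List String) (st : List String × List Int × Nat) (anchor : String) : List String × List Int × Nat :=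
  let r := pvWhileSkip content anchor st.2.2 st.1 st.2.1
  if r.2.2 < content.length then (r.1 ++ [anchor], r.2.1, r.2.2 + 1) else r

-- trailing `while content_token_index < len(content_tokens)`
def pvTail (content : List String) (idx : Nat) (tt : List String) (dl : List Int) : List String × List Int :=
  if idx < content.length then
    pvTail content (idx + 1) (tt ++ ["<*>"]) (dl ++ [(idx : Int)])
  else (tt, dl)
termination_by content.length - idx

def update_dynamic_token_extract_info (content_tokens : List String) (new_template_tokens : List String) : String × List Int :=
  let anchors := new_template_tokens.filter (fun token => token ≠ "<*>")
  let st := anchors.foldl (pvAnchorStep content_tokens) (([] : List String), ([] : List Int), 0)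
  let r := pvTail content_tokens st.2.2 st.1 st.2.1
  (PySem.Str.join " " r.1, r.2)

-- ===== PORT B =====
-- `for i, c in enumerate(content_tokens)` with anchor_index cursor
def pvBLoop (anchors : List String) : List String → Nat → Nat → List String → List Int → List String × List Int
  | [], _, _, tt, dl => (tt, dl)
  | c :: cs, i, ai, tt, dl =>
    if ai < anchors.length ∧ c = anchors[ai]! then
      pvBLoop anchors cs (i + 1) (ai + 1) (tt ++ [anchors[ai]!]) dl
    else
      pvBLoop anchors cs (i + 1) ai (tt ++ ["<*>"]) (dl ++ [(i : Int)])

def update_dynamic_token_extract_info_alt (content_tokens : List String) (new_template_tokens : List String) : String × List Int :=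
  let anchors := new_template_tokens.filter (fun token => token ≠ "<*>")
  let r := pvBLoop anchors content_tokens 0 0 [] []
  (PySem.Str.join " " r.1, r.2)

-- ===== PRECONDITION & SPEC =====
def Spec_update_dynamic_token_extract_info (content_tokens : List String) (new_template_tokens : List String) (out : String × List Int) : Prop := out = update_dynamic_token_extract_info_alt content_tokens new_template_tokens
instance (content_tokens : List String) (new_template_tokens : List String) (out : String × List Int) : Decidable (Spec_update_dynamic_token_extract_info content_tokens new_template_tokens out) := by unfold Spec_update_dynamic_token_extract_info; infer_instance

-- ===== CLAIM (what is proved, stated in full; the proofs are below) =====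
def Claim_equal_update_dynamic_token_extract_info : Prop := ∀ (content_tokens : List String) (new_template_tokens : List String), Dom_update_dynamic_token_extract_info content_tokens new_template_tokens → Spec_update_dynamic_token_extract_info content_tokens new_template_tokens (update_dynamic_token_extract_info content_tokens new_template_tokens)

-- ===== LEMMAS AND PROOFS =====

-- common recursive characterisation of the greedy merge
def pvMrg : List String → List String → Nat → List String × List Int
  | [], _, _ => ([], [])
  | _ :: cs, [], i =>
    let r := pvMrg cs [] (i + 1); ("<*>" :: r.1, (i : Int) :: r.2)
  | c :: cs, a :: rest, i =>
    if c = a then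
      let r := pvMrg cs rest (i + 1); (a :: r.1, r.2)
    else
      let r := pvMrg cs (a :: rest) (i + 1); ("<*>" :: r.1, (i : Int) :: r.2)

theorem pvBLoop_eq_mrg (anchors : List String) :
    ∀ (cs : List String) (i ai : Nat) (tt : List String) (dl : List Int),
      pvBLoop anchors cs i ai tt dl =
        (tt ++ (pvMrg cs (anchors.drop ai) i).1, dl ++ (pvMrg cs (anchors.drop ai) i).2) := by
  intro cs
  induction cs with
  | nil => intro i ai tt dl; simp [pvBLoop, pvMrg]
  | cons c cs ih =>
    intro i ai tt dl
    by_cases hai : ai < anchors.length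
    · have hdrop : anchors.drop ai = anchors[ai] :: anchors.drop (ai + 1) :=
        (List.getElem_cons_drop hai).symm
      have hbang : anchors[ai]! = anchors[ai] := getElem!_pos anchors ai hai
      by_cases hc : c = anchors[ai]
      · have : pvBLoop anchors (c :: cs) i ai tt dl =
            pvBLoop anchors cs (i + 1) (ai + 1) (tt ++ [anchors[ai]!]) dl := by
          simp [pvBLoop, hai, hc]
        rw [this, ih, hdrop]
        simp [pvMrg, hc, hbang]
      · have : pvBLoop anchors (c :: cs) i ai tt dl =
            pvBLoop anchors cs (i + 1) ai (tt ++ ["<*>"]) (dl ++ [(i : Int)]) := by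
          simp [pvBLoop, hbang, hc]
        rw [this, ih, hdrop]
        simp [pvMrg, hc]
    · have hdrop : anchors.drop ai = [] := List.drop_eq_nil_of_le (by omega)
      have : pvBLoop anchors (c :: cs) i ai tt dl =
          pvBLoop anchors cs (i + 1) ai (tt ++ ["<*>"]) (dl ++ [(i : Int)]) := by
        simp [pvBLoop, hai]
      rw [this, ih, hdrop]
      simp [pvMrg]

theorem pvFoldl_stuck (content : List String) (idx : Nat) (h : ¬ idx < content.length) :
    ∀ (anchors : List String) (tt : List String) (dl : List Int),
      anchors.foldl (pvAnchorStep content) (tt, dl, idx) = (tt, dl, idx) := by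
  intro anchors
  induction anchors with
  | nil => intro tt dl; simp
  | cons a rest ih =>
    intro tt dl
    have hstep : pvAnchorStep content (tt, dl, idx) a = (tt, dl, idx) := by
      unfold pvAnchorStep pvWhileSkip
      simp [h]
    simp only [List.foldl_cons, hstep]
    exact ih tt dl

def pvAProc (content : List String) (anchors : List String) (idx : Nat) (tt : List String) (dl : List Int) : List String × List Int :=
  let st := anchors.foldl (pvAnchorStep content) (tt, dl, idx)
  pvTail content st.2.2 st.1 st.2.1

theorem pvAProc_eq_mrg (content : List String) :
    ∀ (n idx : Nat), content.length - idx ≤ n →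
      ∀ (anchors : List String) (tt : List String) (dl : List Int),
        pvAProc content anchors idx tt dl =
          (tt ++ (pvMrg (content.drop idx) anchors idx).1,
           dl ++ (pvMrg (content.drop idx) anchors idx).2) := by
  intro n
  induction n with
  | zero =>
    intro idx hle anchors tt dl
    have h : ¬ idx < content.length := by omega
    have hdrop : content.drop idx = [] := List.drop_eq_nil_of_le (by omega)
    unfold pvAProc
    rw [pvFoldl_stuck content idx h]
    unfold pvTail
    simp [h, hdrop, pvMrg]
  | succ n ih =>
    intro idx hle anchors tt dl
    by_cases h : idx < content.length
    · have hdrop : content.drop idx = content[idx] :: content.drop (idx + 1) :=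
        (List.getElem_cons_drop h).symm
      have hbang : content[idx]! = content[idx] := getElem!_pos content idx h
      have hle' : content.length - (idx + 1) ≤ n := by omega
      cases anchors with
      | nil =>
        have : pvAProc content [] idx tt dl =
            pvAProc content [] (idx + 1) (tt ++ ["<*>"]) (dl ++ [(idx : Int)]) := by
          unfold pvAProc
          simp only [List.foldl_nil]
          conv_lhs => rw [pvTail]
          simp [h]
        rw [this, ih (idx + 1) hle' [] _ _, hdrop]
        simp [pvMrg]
      | cons a rest =>
        by_cases hc : content[idx] = a
        · have hskip : pvWhileSkip content a idx tt dl = (tt, dl, idx) := by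
            unfold pvWhileSkip
            simp [h, hc]
          have hstep : pvAnchorStep content (tt, dl, idx) a = (tt ++ [a], dl, idx + 1) := by
            unfold pvAnchorStep
            simp [hskip, h]
          have : pvAProc content (a :: rest) idx tt dl =
              pvAProc content rest (idx + 1) (tt ++ [a]) dl := by
            unfold pvAProc
            simp only [List.foldl_cons, hstep]
          rw [this, ih (idx + 1) hle' rest _ _, hdrop]
          simp [pvMrg, hc]
        · have hskip : pvWhileSkip content a idx tt dl =
              pvWhileSkip content a (idx + 1) (tt ++ ["<*>"]) (dl ++ [(idx : Int)]) := by
            conv_lhs => rw [pvWhileSkip]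
            simp [h, hc]
          have hstep : pvAnchorStep content (tt, dl, idx) a =
              pvAnchorStep content (tt ++ ["<*>"], dl ++ [(idx : Int)], idx + 1) a := by
            unfold pvAnchorStep
            simp only [hskip]
          have : pvAProc content (a :: rest) idx tt dl =
              pvAProc content (a :: rest) (idx + 1) (tt ++ ["<*>"]) (dl ++ [(idx : Int)]) := by
            unfold pvAProc
            simp only [List.foldl_cons, hstep]
          rw [this, ih (idx + 1) hle' (a :: rest) _ _, hdrop]
          simp [pvMrg, hc]
    · have hdrop : content.drop idx = [] := List.drop_eq_nil_of_le (by omega)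
      unfold pvAProc
      rw [pvFoldl_stuck content idx h]
      unfold pvTail
      simp [h, hdrop, pvMrg]

-- ===== VERDICT (by name: the statement is the Claim_ definition above) =====
theorem update_dynamic_token_extract_info_spec : Claim_equal_update_dynamic_token_extract_info := by
  intro content_tokens new_template_tokens _
  unfold Spec_update_dynamic_token_extract_info
  unfold update_dynamic_token_extract_info update_dynamic_token_extract_info_alt
  have hA := pvAProc_eq_mrg content_tokens content_tokens.length 0 (by omega)
    (new_template_tokens.filter (fun token => token ≠ "<*>")) [] []
  have hB := pvBLoop_eq_mrg (new_template_tokens.filter (fun token => token ≠ "<*>"))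
    content_tokens 0 0 [] []
  unfold pvAProc at hA
  simp only [List.drop_zero, List.nil_append] at hA hB
  simp only [hA, hB]
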